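-- pv_equiv track=rewrite | github.com/davidpenaloza/mvp-farmacias-v2 | tests/test_query_parsing_debug.py | extract_commune_manually
-- ===== SOURCE A (Python) =====
-- def extract_commune_manually(query):
--     """Manual extraction logic to see what we expect"""
--     query_lower = query.lower()
--
--     # Remove common words
--     stop_words = ['farmacia', 'farmacias', 'en', 'de', 'la', 'el', 'del', 'cerca', 'buscar', 'quiero', 'necesito']
--
--     words = query_lower.split()
--     filtered_words = []
--
--     i = 0
--     while i < len(words):
--         if words[i] == 'la' and i + 1 < len(words) and words[i + 1] == 'florida':
--             filtered_words.append('la florida')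
--             i += 2
--         elif words[i] not in stop_words:
--             filtered_words.append(words[i])
--             i += 1
--         else:
--             i += 1
--
--     return ' '.join(filtered_words)
-- ===== SOURCE B (Python) =====
-- def extract_commune_manually(query):
--     """Look-behind DFA: one fold over the words tracking the previous raw word.
--
--     A looks AHEAD ('la' + next == 'florida') and skips two indices; B instead
--     looks BEHIND: every 'la' is dropped as a stop word, and when 'florida'
--     arrives right after a raw 'la' the merged phrase is emitted. Correct
--     because the phrase's second word 'florida' is never itself 'la', so the
--     raw-previous-word state fully determines A's lookahead decision.
--     """
--     stop_words = {'farmacia', 'farmacias', 'en', 'de', 'la', 'el', 'del',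
--                   'cerca', 'buscar', 'quiero', 'necesito'}
--     out = []
--     prev = None
--     for w in query.lower().split():
--         if w == 'florida' and prev == 'la':
--             out.append('la florida')
--         elif w not in stop_words:
--             out.append(w)
--         prev = w
--     return ' '.join(out)
-- ===== Notes on version B (the rewrite author's own statement) =====
-- stated objective: alternative
-- what changed: A scans with an index, looking AHEAD ('la' followed by 'florida') and skipping two positions to merge the phrase; B is a single look-BEHIND fold with a previous-word state: 'la' is always dropped as a stop word and the merged phrase is emitted when 'florida' arrives right after a raw 'la', so there is no index arithmetic and no skip.
import Mathlib
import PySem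

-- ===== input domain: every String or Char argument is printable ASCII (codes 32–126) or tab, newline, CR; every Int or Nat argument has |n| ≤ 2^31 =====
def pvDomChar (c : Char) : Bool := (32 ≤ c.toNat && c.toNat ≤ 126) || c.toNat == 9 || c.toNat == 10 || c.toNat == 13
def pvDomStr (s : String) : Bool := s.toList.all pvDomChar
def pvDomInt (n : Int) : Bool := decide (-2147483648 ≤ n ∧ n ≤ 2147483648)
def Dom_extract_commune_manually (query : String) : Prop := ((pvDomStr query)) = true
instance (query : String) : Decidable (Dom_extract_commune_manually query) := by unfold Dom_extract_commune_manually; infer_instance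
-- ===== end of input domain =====

-- B replaces A's index-based look-AHEAD scan (merge 'la'+'florida', skip two) by a single
-- look-BEHIND fold carrying the previous raw word; objective: alternative algorithm, same cost.

-- ===== PORT A =====
def pvStopWords : List String :=
  ["farmacia", "farmacias", "en", "de", "la", "el", "del", "cerca", "buscar", "quiero", "necesito"]

-- A's while-loop: lookahead merge of 'la'+'florida' interleaved with stop-word filtering
def pvALoop : List String → List String
  | [] => []
  | w :: rest =>
    if w = "la" ∧ rest.head? = some "florida" then
      "la florida" :: pvALoop rest.tail
    else if pvStopWords.contains w then
      pvALoop rest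
    else
      w :: pvALoop rest
termination_by ws => ws.length
decreasing_by all_goals (simp; try omega)

def extract_commune_manually (query : String) : String :=
  PySem.Str.join " " (pvALoop (PySem.Str.split₀ (PySem.Str.lower query)))

-- ===== PORT B =====
-- B's loop body: state = (output so far, previous raw word); emit 'la florida' when a
-- 'florida' arrives right after a raw 'la', otherwise emit non-stop-words; no lookahead.
def pvBStep (st : List String × Option String) (w : String) : List String × Option String :=
  (if w = "florida" ∧ st.2 = some "la" then st.1 ++ ["la florida"]
   else if pvStopWords.contains w then st.1
   else st.1 ++ [w],
   some w)

def extract_commune_manually_alt (query : String) : String :=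
  PySem.Str.join " "
    (((PySem.Str.split₀ (PySem.Str.lower query)).foldl pvBStep ([], none)).1)

-- ===== PRECONDITION & SPEC =====
def Spec_extract_commune_manually (query : String) (out : String) : Prop := out = extract_commune_manually_alt query
instance (query : String) (out : String) : Decidable (Spec_extract_commune_manually query out) := by unfold Spec_extract_commune_manually; infer_instance

-- ===== CLAIM (what is proved, stated in full; the proofs are below) =====
def Claim_equal_extract_commune_manually : Prop := ∀ (query : String), Dom_extract_commune_manually query → Spec_extract_commune_manually query (extract_commune_manually query)

-- ===== LEMMAS AND PROOFS =====

-- proof-only recursive view of B's fold: output emitted from a given previous-word state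
def pvG (prev : Option String) : List String → List String
  | [] => []
  | w :: rest =>
    (if w = "florida" ∧ prev = some "la" then ["la florida"]
     else if pvStopWords.contains w then []
     else [w]) ++ pvG (some w) rest

lemma pvFoldl_eq_pvG (ws : List String) (acc : List String) (prev : Option String) :
    (ws.foldl pvBStep (acc, prev)).1 = acc ++ pvG prev ws := by
  induction ws generalizing acc prev with
  | nil => simp [pvG]
  | cons w rest ih =>
      simp only [List.foldl_cons, pvBStep, pvG, ih]
      split_ifs <;> simp

-- A's lookahead scan equals B's look-behind emission (mutual statement over the state)
lemma pvG_eq_pvALoop (ws : List String) :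
    (∀ prev : Option String, prev ≠ some "la" → pvG prev ws = pvALoop ws) ∧
      pvG (some "la") ws = pvALoop ("la" :: ws) := by
  induction ws with
  | nil =>
      constructor
      · intro prev _; simp [pvG, pvALoop]
      · simp [pvG, pvALoop, pvStopWords]
  | cons w rest ih =>
      constructor
      · intro prev hprev
        by_cases hw : w = "la"
        · subst hw
          have h1 : pvG prev ("la" :: rest) = pvG (some "la") rest := by
            simp [pvG, hprev, pvStopWords]
          rw [h1, ih.2]
        · rw [pvALoop]
          have hnf : ¬ (w = "la" ∧ rest.head? = some "florida") := by
            intro h; exact hw h.1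
          rw [if_neg hnf]
          have h1 : pvG prev (w :: rest) =
              (if pvStopWords.contains w then [] else [w]) ++ pvG (some w) rest := by
            by_cases hf : w = "florida" ∧ prev = some "la"
            · exact absurd hf.2 hprev
            · simp [pvG, hf]
          rw [h1, ih.1 (some w) (by simpa using hw)]
          split_ifs with hs
          · simp
          · simp
      · -- prev = some "la"
        by_cases hf : w = "florida"
        · subst hf
          have h1 : pvG (some "la") ("florida" :: rest) =
              "la florida" :: pvG (some "florida") rest := by
            simp [pvG]
          rw [h1, ih.1 (some "florida") (by decide)]
          rw [pvALoop]
          simp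
        · by_cases hw : w = "la"
          · subst hw
            have h1 : pvG (some "la") ("la" :: rest) = pvG (some "la") rest := by
              simp [pvG, pvStopWords]
            rw [h1, ih.2]
            conv_rhs => rw [pvALoop]
            have : ¬ ("la" = "la" ∧ ("la" :: rest).head? = some "florida") := by simp
            rw [if_neg this]
            simp [pvStopWords]
          · have h1 : pvG (some "la") (w :: rest) =
                (if pvStopWords.contains w then [] else [w]) ++ pvG (some w) rest := by
              simp [pvG, hf]
            rw [h1, ih.1 (some w) (by simpa using hw)]
            conv_rhs => rw [pvALoop]
            have hnot : ¬ ("la" = "la" ∧ (w :: rest).head? = some "florida") := by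
              simp [hf]
            have hla : pvStopWords.contains "la" = true := by decide
            rw [if_neg hnot, if_pos hla, pvALoop]
            have hnf : ¬ (w = "la" ∧ rest.head? = some "florida") := fun h => hw h.1
            rw [if_neg hnf]
            split_ifs with hs <;> simp

-- ===== VERDICT (by name: the statement is the Claim_ definition above) =====
theorem extract_commune_manually_spec : Claim_equal_extract_commune_manually := by
  intro query _
  unfold Spec_extract_commune_manually extract_commune_manually extract_commune_manually_alt
  rw [pvFoldl_eq_pvG, List.nil_append,
    (pvG_eq_pvALoop _).1 none (by simp)]
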